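-- pv_equiv track=rewrite | github.com/Mmark94/SCRaMbLE-SIM | Mapping_coverage_MM.py | coverage_list_ref
-- ===== SOURCE A (Python) =====
-- def abs_sort_path(path):
--     new_path = []
--     #new_path = [abs(x) for x in path]
--     for number in path:
--         new_path.append(abs(number))
--     new_path.sort()
--     return new_path
--
-- def abs_sort_path_list(paths):
--     new_paths = []
--     for path in paths:
--         new_paths.append(abs_sort_path(path))
--     new_paths2 = []
--     for path in new_paths:
--         for number in path:
--             new_paths2.append(number)
--     new_paths2.sort()
--     return new_paths2
--
-- def coverage_list_ref(paths, reference):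
--     abs_paths = abs_sort_path_list(paths)
--     Dic = {}
--     for LU in reference:
--         LU = abs(LU)
--         if LU not in Dic:
--             Dic[LU] = abs_paths.count(LU)
--     return Dic
-- ===== SOURCE B (Python) =====
-- def coverage_list_ref(paths, reference):
--     Dic = {}
--     for LU in reference:
--         Dic[abs(LU)] = 0
--     for path in paths:
--         for number in path:
--             n = abs(number)
--             if n in Dic:
--                 Dic[n] += 1
--     return Dic
-- ===== Notes on version B (the rewrite author's own statement) =====
-- stated objective: faster
-- what changed: Instead of flattening+sorting all paths and rescanning the flat list with .count for every reference element, B builds the zero-initialized dict over abs(reference) and then makes one pass over the data, incrementing the matching key; the sort and per-key rescans disappear.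
import Mathlib
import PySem

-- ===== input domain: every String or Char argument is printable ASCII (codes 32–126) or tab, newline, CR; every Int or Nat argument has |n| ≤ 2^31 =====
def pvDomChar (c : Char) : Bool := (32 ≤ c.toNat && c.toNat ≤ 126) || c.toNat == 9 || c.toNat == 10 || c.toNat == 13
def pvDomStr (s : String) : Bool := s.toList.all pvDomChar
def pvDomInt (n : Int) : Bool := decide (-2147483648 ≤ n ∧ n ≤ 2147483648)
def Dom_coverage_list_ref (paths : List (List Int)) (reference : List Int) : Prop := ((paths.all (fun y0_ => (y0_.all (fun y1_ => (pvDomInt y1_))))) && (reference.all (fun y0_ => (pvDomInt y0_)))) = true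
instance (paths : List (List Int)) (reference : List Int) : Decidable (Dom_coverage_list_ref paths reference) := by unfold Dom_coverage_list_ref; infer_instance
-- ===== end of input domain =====

-- B replaces A's flatten-and-sort plus a full `.count` rescan per reference element by a
-- zero-initialized dict over abs(reference) followed by ONE pass over the data that
-- increments the matching key (objective: faster; the sort never affected the counts).

-- ===== PORT A =====
def abs_sort_path (path : List Int) : List Int :=
  let new_path := path.foldl (fun acc number => acc ++ [|number|]) []
  PySem.List.sorted new_path (fun x => x) false

def abs_sort_path_list (paths : List (List Int)) : List Int :=
  let new_paths := paths.foldl (fun acc path => acc ++ [abs_sort_path path]) []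
  let new_paths2 := new_paths.foldl (fun acc path => path.foldl (fun a2 n => a2 ++ [n]) acc) []
  PySem.List.sorted new_paths2 (fun x => x) false

def coverage_list_ref (paths : List (List Int)) (reference : List Int) : List (Int × Int) :=
  let abs_paths := abs_sort_path_list paths
  (reference.foldl
    (fun Dic LU =>
      let LU2 := |LU|
      if Dic.contains LU2 then Dic
      else Dic.insert LU2 ((PySem.List.count abs_paths LU2 : Nat) : Int))
    (PySem.Dict.empty : PySem.Dict Int Int)).items

-- ===== PORT B =====
def coverage_list_ref_alt (paths : List (List Int)) (reference : List Int) : List (Int × Int) :=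
  let Dic := reference.foldl (fun d LU => d.insert |LU| 0) (PySem.Dict.empty : PySem.Dict Int Int)
  (paths.foldl
    (fun d path =>
      path.foldl
        (fun d2 number =>
          let n := |number|
          if d2.contains n then d2.modify n 0 (· + 1) else d2)
        d)
    Dic).items

-- ===== PRECONDITION & SPEC =====
def Spec_coverage_list_ref (paths : List (List Int)) (reference : List Int) (out : List (Int × Int)) : Prop := out = coverage_list_ref_alt paths reference
instance (paths : List (List Int)) (reference : List Int) (out : List (Int × Int)) : Decidable (Spec_coverage_list_ref paths reference out) := by unfold Spec_coverage_list_ref; infer_instance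

-- ===== CLAIM (what is proved, stated in full; the proofs are below) =====
def Claim_equal_coverage_list_ref : Prop := ∀ (paths : List (List Int)) (reference : List Int), Dom_coverage_list_ref paths reference → Spec_coverage_list_ref paths reference (coverage_list_ref paths reference)

-- ===== LEMMAS AND PROOFS =====

-- key list both dicts end up with: abs of reference, first occurrences, in order, after `seen`
def pvKeysAux (seen : List Int) : List Int → List Int
  | [] => seen
  | r :: rs => if |r| ∈ seen then pvKeysAux seen rs else pvKeysAux (seen ++ [|r|]) rs

-- the multiset of data values both programs count: abs of every element of every path
def pvFlat (paths : List (List Int)) : List Int :=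
  paths.flatMap (fun p => p.map (fun n => |n|))

lemma abs_sort_path_perm (path : List Int) :
    (abs_sort_path path).Perm (path.map (fun n => |n|)) := by
  unfold abs_sort_path
  rw [PySem.List.foldl_append_singleton_eq_map (fun n => |n|) path []]
  simpa using PySem.List.sorted_perm (path.map (fun n => |n|)) (fun x => x) false

lemma join_map_perm (paths : List (List Int)) :
    ((paths.map abs_sort_path).flatMap id).Perm (pvFlat paths) := by
  induction paths with
  | nil => simp [pvFlat]
  | cons p ps ih =>
      simp only [List.map_cons, List.flatMap_cons, pvFlat] at *
      exact (abs_sort_path_perm p).append ih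

lemma abs_sort_path_list_perm (paths : List (List Int)) :
    (abs_sort_path_list paths).Perm (pvFlat paths) := by
  unfold abs_sort_path_list
  have h1 : paths.foldl (fun acc path => acc ++ [abs_sort_path path]) [] = paths.map abs_sort_path := by
    simpa using PySem.List.foldl_append_singleton_eq_map abs_sort_path paths []
  have hfun : (fun (acc : List Int) (path : List Int) => path.foldl (fun a2 n => a2 ++ [n]) acc)
      = fun acc path => acc ++ path := by
    funext acc path
    simpa using PySem.List.foldl_append_singleton path acc
  simp only [h1, hfun]
  have h2 : (paths.map abs_sort_path).foldl (fun acc path => acc ++ path) []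
      = (paths.map abs_sort_path).flatMap id := by
    simpa using PySem.List.foldl_append_eq_flatMap (id : List Int → List Int) (paths.map abs_sort_path) []
  rw [h2]
  exact (PySem.List.sorted_perm _ _ _).trans (join_map_perm paths)

lemma count_abs_sort_path_list (paths : List (List Int)) (v : Int) :
    PySem.List.count (abs_sort_path_list paths) v = (pvFlat paths).count v := by
  rw [PySem.List.count_eq]
  exact (abs_sort_path_list_perm paths).count_eq v

-- invariant of A's dictionary loop
lemma foldA_inv (ap : List Int) :
    ∀ (ref : List Int) (d : PySem.Dict Int Int), d.keys.Nodup →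
      (∀ k ∈ d.keys, d.getD k 0 = ((PySem.List.count ap k : Nat) : Int)) →
      ((ref.foldl
          (fun Dic LU =>
            let LU2 := |LU|
            if Dic.contains LU2 then Dic
            else Dic.insert LU2 ((PySem.List.count ap LU2 : Nat) : Int)) d).keys = pvKeysAux d.keys ref
        ∧ (ref.foldl
          (fun Dic LU =>
            let LU2 := |LU|
            if Dic.contains LU2 then Dic
            else Dic.insert LU2 ((PySem.List.count ap LU2 : Nat) : Int)) d).keys.Nodup
        ∧ ∀ k ∈ (ref.foldl
          (fun Dic LU =>
            let LU2 := |LU|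
            if Dic.contains LU2 then Dic
            else Dic.insert LU2 ((PySem.List.count ap LU2 : Nat) : Int)) d).keys,
            (ref.foldl
          (fun Dic LU =>
            let LU2 := |LU|
            if Dic.contains LU2 then Dic
            else Dic.insert LU2 ((PySem.List.count ap LU2 : Nat) : Int)) d).getD k 0
              = ((PySem.List.count ap k : Nat) : Int)) := by
  intro ref
  induction ref with
  | nil => intro d hnd hval; exact ⟨rfl, hnd, hval⟩
  | cons r rs ih =>
      intro d hnd hval
      by_cases hm : |r| ∈ d.keys
      · have hc : d.contains |r| = true := (PySem.Dict.contains_iff_mem_keys d |r|).mpr hm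
        simp only [List.foldl_cons, pvKeysAux, hc, if_pos, hm]
        exact ih d hnd hval
      · have hc : d.contains |r| = false := by
          rw [PySem.Dict.contains_eq_decide_mem_keys]; simp [hm]
        have hkeys := PySem.Dict.keys_insert_of_not_contains d ((PySem.List.count ap |r| : Nat) : Int) hc
        have hnd' : (d.insert |r| ((PySem.List.count ap |r| : Nat) : Int)).keys.Nodup :=
          PySem.Dict.nodup_keys_insert d _ _ hnd
        have hval' : ∀ k ∈ (d.insert |r| ((PySem.List.count ap |r| : Nat) : Int)).keys,
            (d.insert |r| ((PySem.List.count ap |r| : Nat) : Int)).getD k 0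
              = ((PySem.List.count ap k : Nat) : Int) := by
          intro k hk
          by_cases hkr : k = |r|
          · subst hkr; rw [PySem.Dict.getD_insert_self]
          · rw [PySem.Dict.getD_insert_of_ne _ _ _ hkr]
            rw [hkeys] at hk
            rcases List.mem_append.mp hk with h | h
            · exact hval k h
            · simp at h; exact absurd h hkr
        simp only [List.foldl_cons, pvKeysAux, hc, hm, if_false, Bool.false_eq_true]
        have := ih (d.insert |r| ((PySem.List.count ap |r| : Nat) : Int)) hnd' hval'
        rwa [hkeys] at this

-- invariant of B's zero-initialization loop
lemma foldB1_inv :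
    ∀ (ref : List Int) (d : PySem.Dict Int Int), d.keys.Nodup →
      (∀ k ∈ d.keys, d.getD k 0 = 0) →
      ((ref.foldl (fun d LU => d.insert |LU| 0) d).keys = pvKeysAux d.keys ref
        ∧ (ref.foldl (fun d LU => d.insert |LU| 0) d).keys.Nodup
        ∧ ∀ k ∈ (ref.foldl (fun d LU => d.insert |LU| 0) d).keys,
            (ref.foldl (fun d LU => d.insert |LU| 0) d).getD k 0 = 0) := by
  intro ref
  induction ref with
  | nil => intro d hnd hval; exact ⟨rfl, hnd, hval⟩
  | cons r rs ih =>
      intro d hnd hval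
      simp only [List.foldl_cons, pvKeysAux]
      by_cases hm : |r| ∈ d.keys
      · have hc : d.contains |r| = true := (PySem.Dict.contains_iff_mem_keys d |r|).mpr hm
        have hkeys : (d.insert |r| (0 : Int)).keys = d.keys :=
          PySem.Dict.keys_insert_of_contains d 0 hc
        have hnd' : (d.insert |r| (0 : Int)).keys.Nodup := by rw [hkeys]; exact hnd
        have hval' : ∀ k ∈ (d.insert |r| (0 : Int)).keys, (d.insert |r| (0 : Int)).getD k 0 = 0 := by
          intro k hk
          by_cases hkr : k = |r|
          · subst hkr; rw [PySem.Dict.getD_insert_self]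
          · rw [PySem.Dict.getD_insert_of_ne _ _ _ hkr]
            rw [hkeys] at hk; exact hval k hk
        have := ih (d.insert |r| 0) hnd' hval'
        rw [hkeys] at this
        simpa [hm] using this
      · have hc : d.contains |r| = false := by
          rw [PySem.Dict.contains_eq_decide_mem_keys]; simp [hm]
        have hkeys : (d.insert |r| (0 : Int)).keys = d.keys ++ [|r|] :=
          PySem.Dict.keys_insert_of_not_contains d 0 hc
        have hnd' : (d.insert |r| (0 : Int)).keys.Nodup := PySem.Dict.nodup_keys_insert d _ _ hnd
        have hval' : ∀ k ∈ (d.insert |r| (0 : Int)).keys, (d.insert |r| (0 : Int)).getD k 0 = 0 := by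
          intro k hk
          by_cases hkr : k = |r|
          · subst hkr; rw [PySem.Dict.getD_insert_self]
          · rw [PySem.Dict.getD_insert_of_ne _ _ _ hkr]
            rw [hkeys] at hk
            rcases List.mem_append.mp hk with h | h
            · exact hval k h
            · simp at h; exact absurd h hkr
        have := ih (d.insert |r| 0) hnd' hval'
        rw [hkeys] at this
        simpa [hm] using this

-- invariant of B's counting pass over one path
lemma foldB2_inv :
    ∀ (ds : List Int) (d : PySem.Dict Int Int),
      ((ds.foldl
          (fun d2 number =>
            let n := |number|
            if d2.contains n then d2.modify n 0 (· + 1) else d2) d).keys = d.keys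
        ∧ ∀ k ∈ d.keys,
            (ds.foldl
          (fun d2 number =>
            let n := |number|
            if d2.contains n then d2.modify n 0 (· + 1) else d2) d).getD k 0
              = d.getD k 0 + ((ds.map (fun n => |n|)).count k : Int)) := by
  intro ds
  induction ds with
  | nil => intro d; exact ⟨rfl, by intro k _; simp⟩
  | cons n ns ih =>
      intro d
      simp only [List.foldl_cons]
      by_cases hm : |n| ∈ d.keys
      · have hc : d.contains |n| = true := (PySem.Dict.contains_iff_mem_keys d |n|).mpr hm
        have hkeysmod : (d.modify |n| 0 (· + 1)).keys = d.keys := by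
          rw [PySem.Dict.keys_modify]
          exact PySem.Dict.keys_insert_of_contains d _ hc
        obtain ⟨ihk, ihv⟩ := ih (d.modify |n| 0 (· + 1))
        constructor
        · simp only [hc, if_true]; rw [ihk, hkeysmod]
        · intro k hk
          simp only [hc, if_true]
          rw [ihv k (by rw [hkeysmod]; exact hk)]
          by_cases hkn : k = |n|
          · subst hkn
            rw [PySem.Dict.getD_modify_self]
            rw [List.map_cons, List.count_cons]
            push_cast
            simp
            ring
          · rw [PySem.Dict.getD_modify_of_ne _ _ _ hkn]
            have : (|n| == k) = false := by simp [Ne.symm hkn]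
            rw [List.map_cons, List.count_cons, this]
            simp
      · have hc : d.contains |n| = false := by
          rw [PySem.Dict.contains_eq_decide_mem_keys]; simp [hm]
        obtain ⟨ihk, ihv⟩ := ih d
        constructor
        · simp only [hc, Bool.false_eq_true, if_false]; exact ihk
        · intro k hk
          simp only [hc, Bool.false_eq_true, if_false]
          rw [ihv k hk]
          have hkn : k ≠ |n| := fun h => hm (h ▸ hk)
          have : (|n| == k) = false := by simp [Ne.symm hkn]
          simp [List.count_cons, this]

-- invariant of B's counting pass over all paths
lemma foldB3_inv :
    ∀ (paths : List (List Int)) (d : PySem.Dict Int Int),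
      ((paths.foldl
          (fun d path =>
            path.foldl
              (fun d2 number =>
                let n := |number|
                if d2.contains n then d2.modify n 0 (· + 1) else d2) d) d).keys = d.keys
        ∧ ∀ k ∈ d.keys,
            (paths.foldl
          (fun d path =>
            path.foldl
              (fun d2 number =>
                let n := |number|
                if d2.contains n then d2.modify n 0 (· + 1) else d2) d) d).getD k 0
              = d.getD k 0 + ((pvFlat paths).count k : Int)) := by
  intro paths
  induction paths with
  | nil => intro d; exact ⟨rfl, by intro k _; simp [pvFlat]⟩
  | cons p ps ih =>
      intro d
      simp only [List.foldl_cons]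
      obtain ⟨hk2, hv2⟩ := foldB2_inv p d
      obtain ⟨ihk, ihv⟩ := ih (p.foldl
        (fun d2 number =>
          let n := |number|
          if d2.contains n then d2.modify n 0 (· + 1) else d2) d)
      refine ⟨by rw [ihk, hk2], ?_⟩
      intro k hk
      rw [ihv k (by rw [hk2]; exact hk), hv2 k hk]
      simp [pvFlat, List.count_append]
      ring

-- ===== VERDICT (by name: the statement is the Claim_ definition above) =====
theorem coverage_list_ref_spec : Claim_equal_coverage_list_ref := by
  intro paths reference _
  unfold Spec_coverage_list_ref coverage_list_ref coverage_list_ref_alt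
  obtain ⟨hAk, hAnd, hAv⟩ := foldA_inv (abs_sort_path_list paths) reference PySem.Dict.empty
    (by simp [PySem.Dict.keys_empty]) (by simp [PySem.Dict.keys_empty])
  obtain ⟨hBk, hBnd, hBv⟩ := foldB1_inv reference PySem.Dict.empty
    (by simp [PySem.Dict.keys_empty]) (by simp [PySem.Dict.keys_empty])
  set dA := reference.foldl
    (fun Dic LU =>
      let LU2 := |LU|
      if Dic.contains LU2 then Dic
      else Dic.insert LU2 ((PySem.List.count (abs_sort_path_list paths) LU2 : Nat) : Int))
    (PySem.Dict.empty : PySem.Dict Int Int) with hdA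
  set dB := reference.foldl (fun d LU => d.insert |LU| 0) (PySem.Dict.empty : PySem.Dict Int Int) with hdB
  obtain ⟨hCk, hCv⟩ := foldB3_inv paths dB
  set dC := paths.foldl
    (fun d path =>
      path.foldl
        (fun d2 number =>
          let n := |number|
          if d2.contains n then d2.modify n 0 (· + 1) else d2) d) dB with hdC
  have hkeq : dA.keys = dC.keys := by
    rw [hCk, hAk, hBk]
  have hCnd : dC.keys.Nodup := by rw [hCk]; exact hBnd
  rw [PySem.Dict.items_eq_map_keys dA hAnd 0, PySem.Dict.items_eq_map_keys dC hCnd 0, hkeq]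
  apply List.map_congr_left
  intro k hk
  have hkB : k ∈ dB.keys := by rw [← hCk]; exact hk
  rw [hCv k hkB, hBv k hkB, hAv k (by rw [hkeq]; exact hk)]
  rw [count_abs_sort_path_list]
  simp
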